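-- pv_equiv track=rewrite | github.com/inferior3x/JNU-course-seat-alert | seat-checker/test-mongodb.py | divide_range_by_number
-- ===== SOURCE A (Python) =====
-- def divide_range_by_number(length, range_number):
--     result = []
--     current = 0
--     for i in range(range_number):
--         end = current + (length // range_number) - 1 + (1 if (length % range_number) > i else 0)
--         result.append((current, end))
--         current = end + 1
--     return result
-- ===== SOURCE B (Python) =====
-- def divide_range_by_number(length, range_number):
--     if range_number <= 0:
--         return []
--     q, r = divmod(length, range_number)
--     return [(i * q + min(i, r), i * q + min(i, r) + q - 1 + (1 if i < r else 0))
--             for i in range(range_number)]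
-- ===== Notes on version B (the rewrite author's own statement) =====
-- stated objective: alternative
-- what changed: Replaced the carried `current` accumulator loop by a closed-form list comprehension: each interval's start is i*q + min(i, r) with q, r = divmod(length, range_number), computed directly from the index.
import Mathlib
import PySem

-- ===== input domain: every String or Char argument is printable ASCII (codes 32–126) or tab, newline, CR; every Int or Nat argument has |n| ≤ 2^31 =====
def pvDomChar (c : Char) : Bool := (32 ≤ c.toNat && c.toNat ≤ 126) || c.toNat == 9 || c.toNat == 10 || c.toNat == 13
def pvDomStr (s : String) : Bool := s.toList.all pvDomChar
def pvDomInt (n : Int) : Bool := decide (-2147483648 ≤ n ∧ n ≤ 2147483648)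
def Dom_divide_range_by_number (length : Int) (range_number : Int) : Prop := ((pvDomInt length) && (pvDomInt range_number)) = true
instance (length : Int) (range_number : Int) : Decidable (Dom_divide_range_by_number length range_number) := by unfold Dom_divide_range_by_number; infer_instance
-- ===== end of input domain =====

-- B replaces A's carried `current` accumulator by a closed-form bound for each index (alternative decomposition, same cost).

-- ===== PORT A =====
def divide_range_by_number (length : Int) (range_number : Int) : List (Int × Int) :=
  (((PySem.List.pyRange 0 range_number 1).foldl
      (fun (st : List (Int × Int) × Int) i =>
        let e := st.2 + PySem.Int.floordiv length range_number - 1 +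
                   (if PySem.Int.mod length range_number > i then 1 else 0)
        (st.1 ++ [(st.2, e)], e + 1))
      ([], 0))).1

-- ===== PORT B =====
def divide_range_by_number_alt (length : Int) (range_number : Int) : List (Int × Int) :=
  if range_number ≤ 0 then []
  else
    let q := PySem.Int.floordiv length range_number
    let r := PySem.Int.mod length range_number
    (PySem.List.pyRange 0 range_number 1).map
      (fun i => (i * q + min i r, i * q + min i r + q - 1 + (if i < r then 1 else 0)))

-- ===== PRECONDITION & SPEC =====
def Spec_divide_range_by_number (length : Int) (range_number : Int) (out : List (Int × Int)) : Prop := out = divide_range_by_number_alt length range_number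
instance (length : Int) (range_number : Int) (out : List (Int × Int)) : Decidable (Spec_divide_range_by_number length range_number out) := by unfold Spec_divide_range_by_number; infer_instance

-- ===== CLAIM (what is proved, stated in full; the proofs are below) =====
def Claim_equal_divide_range_by_number : Prop := ∀ (length : Int) (range_number : Int), Dom_divide_range_by_number length range_number → Spec_divide_range_by_number length range_number (divide_range_by_number length range_number)

-- ===== LEMMAS AND PROOFS =====

-- loop invariant: after folding over range(m), the result list is the closed-form map
-- and `current` equals m*q + min m r
lemma fold_closed_form (q r : Int) (hr : 0 ≤ r) (m : Nat) :
    (PySem.List.pyRange 0 (m : Int) 1).foldl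
      (fun (st : List (Int × Int) × Int) i =>
        (st.1 ++ [(st.2, st.2 + q - 1 + (if r > i then 1 else 0))],
         (st.2 + q - 1 + (if r > i then 1 else 0)) + 1))
      ([], 0)
    = ((PySem.List.pyRange 0 (m : Int) 1).map
        (fun i => (i * q + min i r, i * q + min i r + q - 1 + (if i < r then 1 else 0))),
       (m : Int) * q + min (m : Int) r) := by
  induction m with
  | zero => simp; omega
  | succ n ih =>
    have h : ((n + 1 : Nat) : Int) = (n : Int) + 1 := by push_cast; ring
    rw [h, PySem.List.pyRange_one_succ_right (by positivity), List.foldl_append, ih,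
        List.map_append]
    simp only [List.foldl_cons, List.foldl_nil, List.map_cons, List.map_nil]
    refine Prod.ext rfl ?_
    have hq : ((n : Int) + 1) * q = (n : Int) * q + q := by ring
    rw [hq]
    generalize (n : Int) * q = t
    split_ifs <;> omega

-- ===== VERDICT (by name: the statement is the Claim_ definition above) =====
theorem divide_range_by_number_spec : Claim_equal_divide_range_by_number := by
  intro length range_number _
  unfold Spec_divide_range_by_number divide_range_by_number divide_range_by_number_alt
  by_cases h : range_number ≤ 0
  · simp [h, PySem.List.pyRange_one_eq_nil h]
  · rw [not_le] at h
    simp only [if_neg (not_le.mpr h)]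
    have hr : 0 ≤ PySem.Int.mod length range_number := PySem.Int.mod_nonneg length h
    generalize PySem.Int.floordiv length range_number = q at hr ⊢
    generalize PySem.Int.mod length range_number = r at hr ⊢
    have hm : range_number = ((range_number.toNat : Nat) : Int) := by omega
    rw [hm, fold_closed_form q r hr range_number.toNat]
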